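-- pv_equiv track=rewrite | github.com/mysportsbetnow24/nfldraftmodel2026 | src/modeling/team_fit.py | _role_bucket
-- ===== SOURCE A (Python) =====
-- def _role_bucket(position: str, role_hint: str, scheme_hint: str) -> str:
--     role = str(role_hint or "").lower()
--     scheme = str(scheme_hint or "").lower()
--     text = f"{role} {scheme}"
--
--     if position == "QB":
--         if any(token in text for token in {"movement", "creator", "rpo", "boot", "play-action"}):
--             return "movement_creator"
--         if any(token in text for token in {"distributor", "structure", "timing", "pocket"}):
--             return "structure_distributor"
--         return "balanced_qb"
--
--     if position == "RB":
--         if any(token in text for token in {"one-cut", "slasher", "wide-zone", "zone"}):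
--             return "zone_runner"
--         if any(token in text for token in {"bruiser", "grinder", "gap", "duo", "power"}):
--             return "power_runner"
--         if any(token in text for token in {"every-down", "passing-down utility", "feature", "receiving"}):
--             return "feature_back"
--         return "balanced_back"
--
--     if position == "WR":
--         if any(token in text for token in {"field-stretching", "vertical", "boundary", "x receiver"}):
--             return "boundary_vertical"
--         if any(token in text for token in {"slot", "movement", "separator", "alignment-flexible", "z receiver"}):
--             return "separator_space"
--         return "balanced_receiver"
--
--     if position == "TE":
--         if any(token in text for token in {"move", "detached", "mismatch", "flex"}):
--             return "move_te"
--         if any(token in text for token in {"in-line", "attach", "y-tight", "inline"}):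
--             return "inline_te"
--         return "balanced_te"
--
--     if position in {"OT", "IOL"}:
--         if any(token in text for token in {"movement", "zone", "wide-zone"}):
--             return "zone_mover"
--         if any(token in text for token in {"power", "drive", "displacement", "gap", "duo"}):
--             return "power_displacer"
--         if any(token in text for token in {"pass-pro", "pocket-control", "translator"}):
--             return "pass_pro"
--         return "balanced_ol"
--
--     if position == "EDGE":
--         if any(token in text for token in {"wide-alignment", "speed pressure", "rush specialist", "upfield"}):
--             return "speed_edge"
--         if any(token in text for token in {"power edge", "edge-setting", "compress", "long-arm"}):
--             return "power_edge"
--         if any(token in text for token in {"stand-up", "sam", "pressure linebacker", "hybrid"}):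
--             return "hybrid_edge"
--         return "balanced_edge"
--
--     if position == "DT":
--         if any(token in text for token in {"one-gap", "three-tech", "disruptor", "upfield"}):
--             return "penetrating_dt"
--         if any(token in text for token in {"anchor", "double-team", "shade", "nose"}):
--             return "anchor_dt"
--         return "balanced_dt"
--
--     if position == "LB":
--         if any(token in text for token in {"coverage", "will", "overhang", "star", "run-and-chase"}):
--             return "coverage_lb"
--         if any(token in text for token in {"mike", "thumper", "stack-and-shed"}):
--             return "box_lb"
--         if any(token in text for token in {"sam", "pressure", "blitz"}):
--             return "pressure_lb"
--         return "balanced_lb"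
--
--     if position == "CB":
--         if any(token in text for token in {"outside matchup", "press-match", "travel-capable", "boundary"}):
--             return "outside_cb"
--         if any(token in text for token in {"off-zone", "pattern-match zone"}):
--             return "zone_cb"
--         if any(token in text for token in {"nickel", "slot"}):
--             return "nickel_cb"
--         return "balanced_cb"
--
--     if position == "S":
--         if any(token in text for token in {"eraser", "range-first", "split safety", "deep"}):
--             return "deep_safety"
--         if any(token in text for token in {"robber", "box", "pressure", "downhill"}):
--             return "box_safety"
--         if any(token in text for token in {"big nickel", "matchup", "slot"}):
--             return "big_nickel"
--         return "balanced_safety"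
--
--     return "balanced"
-- ===== SOURCE B (Python) =====
-- # B: one flat priority table of (positions, token, label) rows scanned top-to-bottom;
-- # per-position defaults are sentinel rows with token "" (always a substring), global fallback "balanced".
--
-- def _rows():
--     rows = []
--     def pos(positions, groups, default):
--         for token_group, label in groups:
--             for token in token_group:
--                 rows.append((positions, token, label))
--         rows.append((positions, "", default))
--     pos(("QB",), [
--         (("movement", "creator", "rpo", "boot", "play-action"), "movement_creator"),
--         (("distributor", "structure", "timing", "pocket"), "structure_distributor"),
--     ], "balanced_qb")
--     pos(("RB",), [
--         (("one-cut", "slasher", "wide-zone", "zone"), "zone_runner"),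
--         (("bruiser", "grinder", "gap", "duo", "power"), "power_runner"),
--         (("every-down", "passing-down utility", "feature", "receiving"), "feature_back"),
--     ], "balanced_back")
--     pos(("WR",), [
--         (("field-stretching", "vertical", "boundary", "x receiver"), "boundary_vertical"),
--         (("slot", "movement", "separator", "alignment-flexible", "z receiver"), "separator_space"),
--     ], "balanced_receiver")
--     pos(("TE",), [
--         (("move", "detached", "mismatch", "flex"), "move_te"),
--         (("in-line", "attach", "y-tight", "inline"), "inline_te"),
--     ], "balanced_te")
--     pos(("OT", "IOL"), [
--         (("movement", "zone", "wide-zone"), "zone_mover"),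
--         (("power", "drive", "displacement", "gap", "duo"), "power_displacer"),
--         (("pass-pro", "pocket-control", "translator"), "pass_pro"),
--     ], "balanced_ol")
--     pos(("EDGE",), [
--         (("wide-alignment", "speed pressure", "rush specialist", "upfield"), "speed_edge"),
--         (("power edge", "edge-setting", "compress", "long-arm"), "power_edge"),
--         (("stand-up", "sam", "pressure linebacker", "hybrid"), "hybrid_edge"),
--     ], "balanced_edge")
--     pos(("DT",), [
--         (("one-gap", "three-tech", "disruptor", "upfield"), "penetrating_dt"),
--         (("anchor", "double-team", "shade", "nose"), "anchor_dt"),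
--     ], "balanced_dt")
--     pos(("LB",), [
--         (("coverage", "will", "overhang", "star", "run-and-chase"), "coverage_lb"),
--         (("mike", "thumper", "stack-and-shed"), "box_lb"),
--         (("sam", "pressure", "blitz"), "pressure_lb"),
--     ], "balanced_lb")
--     pos(("CB",), [
--         (("outside matchup", "press-match", "travel-capable", "boundary"), "outside_cb"),
--         (("off-zone", "pattern-match zone"), "zone_cb"),
--         (("nickel", "slot"), "nickel_cb"),
--     ], "balanced_cb")
--     pos(("S",), [
--         (("eraser", "range-first", "split safety", "deep"), "deep_safety"),
--         (("robber", "box", "pressure", "downhill"), "box_safety"),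
--         (("big nickel", "matchup", "slot"), "big_nickel"),
--     ], "balanced_safety")
--     return rows
--
-- _TABLE = _rows()
--
--
-- def _role_bucket(position: str, role_hint: str, scheme_hint: str) -> str:
--     text = f"{str(role_hint or '').lower()} {str(scheme_hint or '').lower()}"
--     for positions, token, label in _TABLE:
--         if position in positions and token in text:
--             return label
--     return "balanced"
-- ===== Notes on version B (the rewrite author's own statement) =====
-- stated objective: simpler
-- what changed: Replaces A's nested per-position if/elif chains with one flat module-level priority list of (positions, token, label) rows scanned top-to-bottom by a single loop, with per-position defaults encoded as empty-token sentinel rows and a global 'balanced' fallback.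
import Mathlib
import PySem

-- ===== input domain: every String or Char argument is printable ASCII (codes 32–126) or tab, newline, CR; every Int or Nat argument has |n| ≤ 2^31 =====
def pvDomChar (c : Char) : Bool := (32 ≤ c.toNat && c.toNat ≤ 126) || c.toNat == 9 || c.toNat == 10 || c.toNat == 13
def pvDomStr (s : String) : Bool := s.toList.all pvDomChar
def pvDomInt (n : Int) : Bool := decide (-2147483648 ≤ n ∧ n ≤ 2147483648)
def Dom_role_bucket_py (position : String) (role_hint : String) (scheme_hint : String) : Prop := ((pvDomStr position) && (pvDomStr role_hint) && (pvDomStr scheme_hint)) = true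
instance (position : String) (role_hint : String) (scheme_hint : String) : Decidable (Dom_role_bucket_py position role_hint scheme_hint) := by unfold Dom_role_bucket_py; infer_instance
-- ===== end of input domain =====

-- B replaces A's per-position if/elif chain with a single flat priority list of (positions, token, label) rows scanned once (defaults are empty-token sentinel rows); same return value, objective: simpler.

-- ===== PORT A =====
-- `any(token in text for token in {...})` ported as `.any` over the literal tokens (order-independent OR)
def pvAnyIn (tokens : List String) (text : String) : Bool :=
  tokens.any (fun token => PySem.Str.isIn token text)

def role_bucket_py (position : String) (role_hint : String) (scheme_hint : String) : String :=
  let role := PySem.Str.lower (if role_hint == "" then "" else role_hint)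
  let scheme := PySem.Str.lower (if scheme_hint == "" then "" else scheme_hint)
  let text := role ++ " " ++ scheme
  if position == "QB" then
    if pvAnyIn ["movement", "creator", "rpo", "boot", "play-action"] text then "movement_creator"
    else if pvAnyIn ["distributor", "structure", "timing", "pocket"] text then "structure_distributor"
    else "balanced_qb"
  else if position == "RB" then
    if pvAnyIn ["one-cut", "slasher", "wide-zone", "zone"] text then "zone_runner"
    else if pvAnyIn ["bruiser", "grinder", "gap", "duo", "power"] text then "power_runner"
    else if pvAnyIn ["every-down", "passing-down utility", "feature", "receiving"] text then "feature_back"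
    else "balanced_back"
  else if position == "WR" then
    if pvAnyIn ["field-stretching", "vertical", "boundary", "x receiver"] text then "boundary_vertical"
    else if pvAnyIn ["slot", "movement", "separator", "alignment-flexible", "z receiver"] text then "separator_space"
    else "balanced_receiver"
  else if position == "TE" then
    if pvAnyIn ["move", "detached", "mismatch", "flex"] text then "move_te"
    else if pvAnyIn ["in-line", "attach", "y-tight", "inline"] text then "inline_te"
    else "balanced_te"
  else if position == "OT" || position == "IOL" then
    if pvAnyIn ["movement", "zone", "wide-zone"] text then "zone_mover"
    else if pvAnyIn ["power", "drive", "displacement", "gap", "duo"] text then "power_displacer"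
    else if pvAnyIn ["pass-pro", "pocket-control", "translator"] text then "pass_pro"
    else "balanced_ol"
  else if position == "EDGE" then
    if pvAnyIn ["wide-alignment", "speed pressure", "rush specialist", "upfield"] text then "speed_edge"
    else if pvAnyIn ["power edge", "edge-setting", "compress", "long-arm"] text then "power_edge"
    else if pvAnyIn ["stand-up", "sam", "pressure linebacker", "hybrid"] text then "hybrid_edge"
    else "balanced_edge"
  else if position == "DT" then
    if pvAnyIn ["one-gap", "three-tech", "disruptor", "upfield"] text then "penetrating_dt"
    else if pvAnyIn ["anchor", "double-team", "shade", "nose"] text then "anchor_dt"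
    else "balanced_dt"
  else if position == "LB" then
    if pvAnyIn ["coverage", "will", "overhang", "star", "run-and-chase"] text then "coverage_lb"
    else if pvAnyIn ["mike", "thumper", "stack-and-shed"] text then "box_lb"
    else if pvAnyIn ["sam", "pressure", "blitz"] text then "pressure_lb"
    else "balanced_lb"
  else if position == "CB" then
    if pvAnyIn ["outside matchup", "press-match", "travel-capable", "boundary"] text then "outside_cb"
    else if pvAnyIn ["off-zone", "pattern-match zone"] text then "zone_cb"
    else if pvAnyIn ["nickel", "slot"] text then "nickel_cb"
    else "balanced_cb"
  else if position == "S" then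
    if pvAnyIn ["eraser", "range-first", "split safety", "deep"] text then "deep_safety"
    else if pvAnyIn ["robber", "box", "pressure", "downhill"] text then "box_safety"
    else if pvAnyIn ["big nickel", "matchup", "slot"] text then "big_nickel"
    else "balanced_safety"
  else "balanced"

-- ===== PORT B =====
-- Source B's `pos` helper: expand one position block into flat rows, default as a "" sentinel row
def pvPosRows (positions : List String) (groups : List (List String × String)) (dflt : String) :
    List (List String × String × String) :=
  (groups.flatMap (fun g => g.1.map (fun token => (positions, token, g.2)))) ++ [(positions, "", dflt)]

-- Source B's module-level _TABLE
def pvTable : List (List String × String × String) :=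
  pvPosRows ["QB"] [ (["movement", "creator", "rpo", "boot", "play-action"], "movement_creator"),
                     (["distributor", "structure", "timing", "pocket"], "structure_distributor") ] "balanced_qb" ++
  pvPosRows ["RB"] [ (["one-cut", "slasher", "wide-zone", "zone"], "zone_runner"),
                     (["bruiser", "grinder", "gap", "duo", "power"], "power_runner"),
                     (["every-down", "passing-down utility", "feature", "receiving"], "feature_back") ] "balanced_back" ++
  pvPosRows ["WR"] [ (["field-stretching", "vertical", "boundary", "x receiver"], "boundary_vertical"),
                     (["slot", "movement", "separator", "alignment-flexible", "z receiver"], "separator_space") ] "balanced_receiver" ++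
  pvPosRows ["TE"] [ (["move", "detached", "mismatch", "flex"], "move_te"),
                     (["in-line", "attach", "y-tight", "inline"], "inline_te") ] "balanced_te" ++
  pvPosRows ["OT", "IOL"] [ (["movement", "zone", "wide-zone"], "zone_mover"),
                            (["power", "drive", "displacement", "gap", "duo"], "power_displacer"),
                            (["pass-pro", "pocket-control", "translator"], "pass_pro") ] "balanced_ol" ++
  pvPosRows ["EDGE"] [ (["wide-alignment", "speed pressure", "rush specialist", "upfield"], "speed_edge"),
                       (["power edge", "edge-setting", "compress", "long-arm"], "power_edge"),
                       (["stand-up", "sam", "pressure linebacker", "hybrid"], "hybrid_edge") ] "balanced_edge" ++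
  pvPosRows ["DT"] [ (["one-gap", "three-tech", "disruptor", "upfield"], "penetrating_dt"),
                     (["anchor", "double-team", "shade", "nose"], "anchor_dt") ] "balanced_dt" ++
  pvPosRows ["LB"] [ (["coverage", "will", "overhang", "star", "run-and-chase"], "coverage_lb"),
                     (["mike", "thumper", "stack-and-shed"], "box_lb"),
                     (["sam", "pressure", "blitz"], "pressure_lb") ] "balanced_lb" ++
  pvPosRows ["CB"] [ (["outside matchup", "press-match", "travel-capable", "boundary"], "outside_cb"),
                     (["off-zone", "pattern-match zone"], "zone_cb"),
                     (["nickel", "slot"], "nickel_cb") ] "balanced_cb" ++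
  pvPosRows ["S"] [ (["eraser", "range-first", "split safety", "deep"], "deep_safety"),
                    (["robber", "box", "pressure", "downhill"], "box_safety"),
                    (["big nickel", "matchup", "slot"], "big_nickel") ] "balanced_safety"

-- Source B's scan loop: first row whose position set contains `position` and whose token is in text
def pvScan : List (List String × String × String) → String → String → String
  | [], _, _ => "balanced"
  | (ps, tok, lab) :: rest, pos, text =>
      if ps.contains pos && PySem.Str.isIn tok text then lab else pvScan rest pos text

def role_bucket_py_alt (position : String) (role_hint : String) (scheme_hint : String) : String :=
  let text := PySem.Str.lower (if role_hint == "" then "" else role_hint) ++ " " ++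
              PySem.Str.lower (if scheme_hint == "" then "" else scheme_hint)
  pvScan pvTable position text

-- ===== PRECONDITION & SPEC =====
def Spec_role_bucket_py (position : String) (role_hint : String) (scheme_hint : String) (out : String) : Prop := out = role_bucket_py_alt position role_hint scheme_hint
instance (position : String) (role_hint : String) (scheme_hint : String) (out : String) : Decidable (Spec_role_bucket_py position role_hint scheme_hint out) := by unfold Spec_role_bucket_py; infer_instance

-- ===== CLAIM =====
def Claim_equal_role_bucket_py : Prop := ∀ (position : String) (role_hint : String) (scheme_hint : String), Dom_role_bucket_py position role_hint scheme_hint → Spec_role_bucket_py position role_hint scheme_hint (role_bucket_py position role_hint scheme_hint)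

-- ===== LEMMAS AND PROOFS =====

-- the empty token is a substring of every text (B's sentinel default rows always fire)
lemma pvIsIn_empty (t : String) : PySem.Str.isIn "" t = true := by
  simp [PySem.Chars.isIn_nil]

-- an OR-guarded branch equals the corresponding chain of single-token branches
lemma pvIteOr (a b : Prop) [Decidable a] [Decidable b] (L X : String) :
    (if a ∨ b then L else X) = if a then L else if b then L else X := by
  by_cases a <;> by_cases b <;> simp_all

set_option maxHeartbeats 4000000 in
theorem role_bucket_py_spec : Claim_equal_role_bucket_py := by
  intro position role_hint scheme_hint _
  unfold Spec_role_bucket_py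
  by_cases h1 : position = "QB"
  · subst h1
    simp [role_bucket_py, role_bucket_py_alt, pvTable, pvPosRows, pvAnyIn, pvScan.eq_def, pvIsIn_empty, pvIteOr]
  by_cases h2 : position = "RB"
  · subst h2
    simp [role_bucket_py, role_bucket_py_alt, pvTable, pvPosRows, pvAnyIn, pvScan.eq_def, pvIsIn_empty, pvIteOr]
  by_cases h3 : position = "WR"
  · subst h3
    simp [role_bucket_py, role_bucket_py_alt, pvTable, pvPosRows, pvAnyIn, pvScan.eq_def, pvIsIn_empty, pvIteOr]
  by_cases h4 : position = "TE"
  · subst h4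
    simp [role_bucket_py, role_bucket_py_alt, pvTable, pvPosRows, pvAnyIn, pvScan.eq_def, pvIsIn_empty, pvIteOr]
  by_cases h5 : position = "OT"
  · subst h5
    simp [role_bucket_py, role_bucket_py_alt, pvTable, pvPosRows, pvAnyIn, pvScan.eq_def, pvIsIn_empty, pvIteOr]
  by_cases h6 : position = "IOL"
  · subst h6
    simp [role_bucket_py, role_bucket_py_alt, pvTable, pvPosRows, pvAnyIn, pvScan.eq_def, pvIsIn_empty, pvIteOr]
  by_cases h7 : position = "EDGE"
  · subst h7
    simp [role_bucket_py, role_bucket_py_alt, pvTable, pvPosRows, pvAnyIn, pvScan.eq_def, pvIsIn_empty, pvIteOr]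
  by_cases h8 : position = "DT"
  · subst h8
    simp [role_bucket_py, role_bucket_py_alt, pvTable, pvPosRows, pvAnyIn, pvScan.eq_def, pvIsIn_empty, pvIteOr]
  by_cases h9 : position = "LB"
  · subst h9
    simp [role_bucket_py, role_bucket_py_alt, pvTable, pvPosRows, pvAnyIn, pvScan.eq_def, pvIsIn_empty, pvIteOr]
  by_cases h10 : position = "CB"
  · subst h10
    simp [role_bucket_py, role_bucket_py_alt, pvTable, pvPosRows, pvAnyIn, pvScan.eq_def, pvIsIn_empty, pvIteOr]
  by_cases h11 : position = "S"
  · subst h11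
    simp [role_bucket_py, role_bucket_py_alt, pvTable, pvPosRows, pvAnyIn, pvScan.eq_def, pvIsIn_empty, pvIteOr]
  simp [role_bucket_py, role_bucket_py_alt, pvTable, pvPosRows, pvScan.eq_def,
        h1, h2, h3, h4, h5, h6, h7, h8, h9, h10, h11]
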